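-- pv_equiv track=rewrite | github.com/AllenWLynch/QuickATAC | quickatac/interleave_fragments.py | sorted_iterator
-- ===== SOURCE A (Python) =====
-- def sorted_iterator(iter):
--
--     for curr in iter:
--
--         try:
--             _prev
--         except UnboundLocalError:
--             _prev = curr
--         else:
--             if not curr >= _prev:
--                 raise ValueError('Items are out of order, {} greater than {}'\
--                         .format(str(curr), str(_prev))
--                     )
--
--             _prev = curr
--
--         yield curr
-- ===== SOURCE B (Python) =====
-- def sorted_iterator(iter):
--     items = list(iter)
--     for prev, curr in zip(items, items[1:]):
--         if not curr >= prev: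
--             raise ValueError('Items are out of order, {} greater than {}'
--                              .format(str(curr), str(prev)))
--     yield from items
-- ===== Notes on version B (the rewrite author's own statement) =====
-- stated objective: alternative
-- what changed: B is staged: it materializes the input, validates all adjacent pairs in one zip pass (same ValueError message on the first violation), then yields the whole list with 'yield from' - instead of A's single streaming pass that carries _prev state and an UnboundLocalError try/except per element.
import Mathlib
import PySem

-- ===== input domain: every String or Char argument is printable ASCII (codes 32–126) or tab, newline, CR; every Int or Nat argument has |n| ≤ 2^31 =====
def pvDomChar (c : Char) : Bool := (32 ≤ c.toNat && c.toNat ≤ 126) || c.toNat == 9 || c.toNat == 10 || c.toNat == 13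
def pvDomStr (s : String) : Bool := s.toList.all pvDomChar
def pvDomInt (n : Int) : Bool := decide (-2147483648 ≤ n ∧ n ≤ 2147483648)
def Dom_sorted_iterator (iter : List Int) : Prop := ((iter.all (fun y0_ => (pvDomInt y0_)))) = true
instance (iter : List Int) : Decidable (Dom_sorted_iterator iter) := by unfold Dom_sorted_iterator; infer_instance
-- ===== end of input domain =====

-- B is staged: materialize, validate all adjacent pairs with one zip pass, then yield the list,
-- instead of A's streaming pass with per-element _prev/UnboundLocalError state; same yields and error on Pre_.


-- ===== PORT A =====
-- A's loop carries `_prev`, unbound on the first iteration (the try/except): modelled as Option Int;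
-- the ValueError branch (excluded by Pre_) is modelled as returning [].
def sortedIterGoA : Option Int → List Int → List Int
  | _, [] => []
  | none, curr :: t => curr :: sortedIterGoA (some curr) t
  | some p, curr :: t =>
      if ¬ (curr ≥ p) then []   -- raise ValueError: excluded by Pre_
      else curr :: sortedIterGoA (some curr) t

def sorted_iterator (iter : List Int) : List Int := sortedIterGoA none iter

-- ===== PORT B =====
-- the zip validation pass: fails (raise ValueError, excluded by Pre_) at the first bad pair.
def checkPairsB : List (Int × Int) → Bool
  | [] => true
  | (prev, curr) :: t => if ¬ (curr ≥ prev) then false else checkPairsB t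

def sorted_iterator_alt (iter : List Int) : List Int :=
  let items := iter                                   -- items = list(iter)
  if checkPairsB (items.zip (items.drop 1))           -- for prev, curr in zip(items, items[1:])
  then items                                          -- yield from items
  else []                                             -- raise ValueError: excluded by Pre_

-- ===== PRECONDITION & SPEC =====
-- Pre_ excludes exactly the inputs on which the Python A raises ValueError: out-of-order lists.
def Pre_sorted_iterator (iter : List Int) : Prop := List.IsChain (· ≤ ·) iter
instance (iter : List Int) : Decidable (Pre_sorted_iterator iter) := by unfold Pre_sorted_iterator; infer_instance
def pvWitness_sorted_iterator : List Int := [1, 2, 2, 5]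

def Spec_sorted_iterator (iter : List Int) (out : List Int) : Prop := out = sorted_iterator_alt iter
instance (iter : List Int) (out : List Int) : Decidable (Spec_sorted_iterator iter out) := by unfold Spec_sorted_iterator; infer_instance

-- ===== CLAIM (what is proved, stated in full; the proofs are below) =====
def Claim_equal_sorted_iterator : Prop := ∀ (iter : List Int), Dom_sorted_iterator iter → Pre_sorted_iterator iter → Spec_sorted_iterator iter (sorted_iterator iter)

-- ===== LEMMAS AND PROOFS =====
theorem sortedIterGoA_sorted (p : Int) (t : List Int) (h : List.IsChain (· ≤ ·) (p :: t)) :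
    sortedIterGoA (some p) t = t := by
  induction t generalizing p with
  | nil => rfl
  | cons c t ih =>
      rw [List.isChain_cons_cons] at h
      simp [sortedIterGoA, h.1, ih c h.2]

theorem checkPairsB_sorted (iter : List Int) (h : List.IsChain (· ≤ ·) iter) :
    checkPairsB (iter.zip (iter.drop 1)) = true := by
  induction iter with
  | nil => rfl
  | cons a t ih =>
      cases t with
      | nil => rfl
      | cons b t' =>
          rw [List.isChain_cons_cons] at h
          simpa [checkPairsB, h.1] using ih h.2

-- ===== VERDICT (by name: the statement is the Claim_ definition above) =====
theorem sorted_iterator_spec : Claim_equal_sorted_iterator := by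
  intro iter _ hpre
  unfold Spec_sorted_iterator sorted_iterator sorted_iterator_alt
  simp only [checkPairsB_sorted iter hpre, if_true]
  cases iter with
  | nil => rfl
  | cons h t => simp [sortedIterGoA, sortedIterGoA_sorted h t hpre]
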